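-- pv_equiv track=rewrite | github.com/sky-butterfly/coding-test | 프로그래머스/Level_0/최빈값 구하기.py | solution
-- ===== SOURCE A (Python) =====
-- def solution(array):
--     obj = {}
--
--     for a in array:
--         if a in obj.keys():
--             obj[a] = obj[a]+1
--         else:
--             obj[a] = 1
--
--     obj2 = {}
--
--     for k in obj.keys():
--         num = obj[k]
--
--         if num in obj2.keys():
--             arr = obj2[num]
--             arr.append(k)
--             obj2[num] = arr
--             continue
--
--         obj2[num] = [k]
--
--     keys = sorted(obj2)
--     key = keys[len(keys)-1]
--     arr2 = obj2[key]
--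
--     if len(arr2) > 1:
--         return -1
--
--     return arr2[0]
-- ===== SOURCE B (Python) =====
-- def solution(array):
--     counts = {}
--     for a in array:
--         counts[a] = counts.get(a, 0) + 1
--     best = max(counts.values())
--     modes = [v for v, c in counts.items() if c == best]
--     return modes[0] if len(modes) == 1 else -1
-- ===== Notes on version B (the rewrite author's own statement) =====
-- stated objective: simpler
-- what changed: A inverts the count dict into a second dict mapping count->list of keys, sorts all distinct counts and indexes the last; B takes max over the counts directly and filters the items once, with no second dict and no sort.
-- outside the precondition, e.g. on solution([]): A raises IndexError, B raises ValueError
import Mathlib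
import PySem

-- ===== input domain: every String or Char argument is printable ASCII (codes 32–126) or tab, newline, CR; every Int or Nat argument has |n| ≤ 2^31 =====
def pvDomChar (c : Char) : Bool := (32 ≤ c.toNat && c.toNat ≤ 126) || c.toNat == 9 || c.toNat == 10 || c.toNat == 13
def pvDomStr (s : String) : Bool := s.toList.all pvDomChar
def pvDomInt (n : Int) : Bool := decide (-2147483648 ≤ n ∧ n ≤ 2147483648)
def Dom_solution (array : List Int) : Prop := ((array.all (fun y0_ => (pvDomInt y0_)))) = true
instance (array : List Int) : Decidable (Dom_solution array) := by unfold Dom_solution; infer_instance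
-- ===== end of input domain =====

-- B replaces A's inverse count→keys dict plus sort with max over the counts and one filter (simpler decomposition).

-- ===== PORT A =====
def solution (array : List Int) : Int :=
  let obj : PySem.Dict Int Int := array.foldl (fun d a =>
    match d.get? a with
    | some v => d.insert a (v + 1)
    | none => d.insert a 1) PySem.Dict.empty
  let obj2 : PySem.Dict Int (List Int) := obj.keys.foldl (fun d2 k =>
    let num := obj.getD k 0
    match d2.get? num with
    | some arr => d2.insert num (arr ++ [k])
    | none => d2.insert num [k]) PySem.Dict.empty
  let keys := PySem.List.sorted obj2.keys (fun x => x) false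
  let key := PySem.List.pyGetD keys (PySem.List.len keys - 1) 0
  let arr2 := obj2.getD key []
  if arr2.length > 1 then -1 else PySem.List.pyGetD arr2 0 0

-- ===== PORT B =====
def solution_alt (array : List Int) : Int :=
  let counts : PySem.Dict Int Int :=
    array.foldl (fun d a => d.insert a (d.getD a 0 + 1)) PySem.Dict.empty
  match PySem.List.max? counts.values (fun x => x) with
  | none => -1   -- unreachable under Pre_ (Python's max raises ValueError on an empty dict)
  | some best =>
    let modes := (counts.items.filter (fun p => p.2 == best)).map (fun p => p.1)
    if modes.length == 1 then PySem.List.pyGetD modes 0 0 else -1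

-- ===== PRECONDITION & SPEC =====
-- Pre_ excludes only the empty list, on which A raises IndexError (and B ValueError).
def Pre_solution (array : List Int) : Prop := array ≠ []
instance (array : List Int) : Decidable (Pre_solution array) := by unfold Pre_solution; infer_instance
def pvWitness_solution : List Int := ([1, 2, 2])

def Spec_solution (array : List Int) (out : Int) : Prop := out = solution_alt array
instance (array : List Int) (out : Int) : Decidable (Spec_solution array out) := by unfold Spec_solution; infer_instance

-- ===== CLAIM (what is proved, stated in full; the proofs are below) =====
def Claim_equal_solution : Prop := ∀ (array : List Int), Dom_solution array → Pre_solution array → Spec_solution array (solution array)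

-- ===== LEMMAS AND PROOFS =====

-- A's first loop and B's counting loop are both collections.Counter.
lemma countA_eq_counter (array : List Int) :
    array.foldl (fun (d : PySem.Dict Int Int) a =>
      match d.get? a with
      | some v => d.insert a (v + 1)
      | none => d.insert a 1) PySem.Dict.empty = PySem.Dict.counter array := by
  rw [PySem.Dict.counter]
  congr 1
  funext d a
  cases h : d.get? a with
  | none => simp [PySem.Dict.modify, PySem.Dict.getD, h]
  | some v => simp [PySem.Dict.modify, PySem.Dict.getD, h]

lemma countB_eq_counter (array : List Int) :
    array.foldl (fun (d : PySem.Dict Int Int) a => d.insert a (d.getD a 0 + 1)) PySem.Dict.empty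
      = PySem.Dict.counter array := rfl

-- A's grouping step, written in one uniform insert form.
lemma groupStep_eq (obj : PySem.Dict Int Int) (d2 : PySem.Dict Int (List Int)) (k : Int) :
    (let num := obj.getD k 0
     match d2.get? num with
     | some arr => d2.insert num (arr ++ [k])
     | none => d2.insert num [k])
    = d2.insert (obj.getD k 0) (d2.getD (obj.getD k 0) [] ++ [k]) := by
  simp only [PySem.Dict.getD]
  cases h : d2.get? ((obj.get? k).getD 0) with
  | none => simp
  | some arr => simp

-- What the grouping fold stores at any count m: the previous contents followed by the keys with that count.
lemma group_getD (f : Int → Int) (ks : List Int) (d2 : PySem.Dict Int (List Int)) (m : Int) :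
    (ks.foldl (fun d2 k => d2.insert (f k) (d2.getD (f k) [] ++ [k])) d2).getD m []
      = d2.getD m [] ++ ks.filter (fun k => f k == m) := by
  induction ks generalizing d2 with
  | nil => simp
  | cons k ks ih =>
    simp only [List.foldl_cons, List.filter_cons, ih]
    by_cases h : f k = m
    · subst h
      simp [PySem.Dict.getD_insert_self]
    · have hb : (f k == m) = false := by simp [h]
      simp only [hb, Bool.false_eq_true, if_false, PySem.Dict.getD,
        PySem.Dict.get?_insert_of_ne _ _ (fun hc => h hc.symm)]

-- Pairwise-≤ sorted list: the last element bounds every member.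
lemma sorted_last_ge (xs : List Int) (s : List Int) (hs : s = PySem.List.sorted xs (fun x => x) false)
    (y : Int) (hy : y ∈ xs) (hlen : 0 < s.length) : y ≤ s[s.length - 1] := by
  have hy' : y ∈ s := by rw [hs, PySem.List.mem_sorted]; exact hy
  obtain ⟨p, hp, hpy⟩ := List.mem_iff_getElem.mp hy'
  subst hs
  have := PySem.List.sorted_id_getElem_mono xs (p := p) (q := (PySem.List.sorted xs (fun x => x) false).length - 1)
    (by omega) (by omega)
  simpa [hpy] using this

-- The two programs agree on every nonempty list.
lemma main_eq (array : List Int) (hne : array ≠ []) : solution array = solution_alt array := by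
  unfold solution solution_alt
  simp only [countA_eq_counter, countB_eq_counter]
  set D := PySem.Set.ofList array with hD
  have hDitems : (PySem.Dict.counter array).items
      = D.map (fun k => (k, (array.count k : Int))) := PySem.Dict.items_counter array
  -- rewrite A's grouping fold into the uniform form
  have hfold :
      ((PySem.Dict.counter array).keys.foldl (fun d2 k =>
        match d2.get? ((PySem.Dict.counter array).getD k 0) with
        | some arr => d2.insert ((PySem.Dict.counter array).getD k 0) (arr ++ [k])
        | none => d2.insert ((PySem.Dict.counter array).getD k 0) [k]) PySem.Dict.empty)
      = ((PySem.Dict.counter array).keys.foldl (fun d2 k =>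
          d2.insert ((array.count k : Int)) (d2.getD ((array.count k : Int)) [] ++ [k])) PySem.Dict.empty) := by
    apply PySem.List.foldl_congr_mem
    intro d2 k _
    have := groupStep_eq (PySem.Dict.counter array) d2 k
    simp only [] at this
    rw [this, PySem.Dict.getD_counter]
  rw [hfold]
  set c : Int → Int := fun k => (array.count k : Int) with hc
  set obj2 := ((PySem.Dict.counter array).keys.foldl (fun d2 k =>
      d2.insert (c k) (d2.getD (c k) [] ++ [k])) PySem.Dict.empty) with hobj2
  have hkeysc : (PySem.Dict.counter array).keys = D := PySem.Dict.keys_counter array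
  -- keys of obj2
  have hkeys2 : obj2.keys = PySem.Set.ofList (D.map c) := by
    rw [hobj2, PySem.Dict.keys_foldl_insert_key (f := fun d2 k => d2.getD (c k) [] ++ [k]), hkeysc]
    exact PySem.Set.update_nil_left _
  have hgetD2 : ∀ m, obj2.getD m [] = D.filter (fun k => c k == m) := by
    intro m
    rw [hobj2, group_getD, hkeysc]
    rfl
  -- values of counts
  have hvals : (PySem.Dict.counter array).values = D.map c := by
    rw [PySem.Dict.values, hDitems, List.map_map]
    rfl
  rw [hvals]
  -- nonemptiness
  have hDne : D ≠ [] := by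
    obtain ⟨a, as, rfl⟩ := List.exists_cons_of_ne_nil hne
    intro h
    have : a ∈ D := by rw [hD, PySem.Set.mem_ofList]; exact List.mem_cons_self
    simp [h] at this
  have hvne : D.map c ≠ [] := by simpa using hDne
  -- B's max exists
  cases hmax : PySem.List.max? (D.map c) (fun x => x) with
  | none => exact absurd ((PySem.List.max?_eq_none_iff _ _).mp hmax) hvne
  | some b =>
    have hbmem : b ∈ D.map c := PySem.List.max?_mem hmax
    have hbmax : ∀ y ∈ D.map c, y ≤ b := PySem.List.max?_isMax hmax
    -- A's sorted-last key equals b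
    set s := PySem.List.sorted obj2.keys (fun x => x) false with hs
    have hsne : s ≠ [] := by
      rw [hs, Ne, PySem.List.sorted_eq_nil_iff, hkeys2]
      intro h
      have : b ∈ PySem.Set.ofList (D.map c) := (PySem.Set.mem_ofList _ _).mpr hbmem
      simp [h] at this
    have hslen : 0 < s.length := List.length_pos_iff.mpr hsne
    have hkey : PySem.List.pyGetD s (PySem.List.len s - 1) 0 = s[s.length - 1] := by
      rw [PySem.List.len_eq, PySem.List.pyGetD_eq_getElem s 0 (by omega) (by omega)]
      congr 1
      omega
    rw [hkey]
    set m := s[s.length - 1] with hm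
    have hmb : m = b := by
      have hmmem : m ∈ D.map c := by
        have : m ∈ s := List.getElem_mem _
        rw [hs, PySem.List.mem_sorted, hkeys2, PySem.Set.mem_ofList] at this
        exact this
      have h1 : m ≤ b := hbmax m hmmem
      have h2 : b ≤ m := by
        apply sorted_last_ge obj2.keys s hs b _ hslen
        rw [hkeys2, PySem.Set.mem_ofList]
        exact hbmem
      omega
    rw [hmb, hgetD2]
    -- both sides are about F := D.filter (c · == b)
    set F := D.filter (fun k => c k == b) with hF
    have hmodes : ((PySem.Dict.counter array).items.filter (fun p => p.2 == b)).map (fun p => p.1) = F := by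
      rw [hDitems, List.filter_map, List.map_map, hF]
      simp only [hc]
      simp [Function.comp_def]
    simp only []
    rw [hmodes]
    have hFne : F ≠ [] := by
      obtain ⟨k0, hk0, hk0b⟩ := List.mem_map.mp hbmem
      intro h
      have : k0 ∈ F := by
        rw [hF, List.mem_filter]
        exact ⟨hk0, by simp [hk0b]⟩
      simp [h] at this
    have hFlen : 0 < F.length := List.length_pos_iff.mpr hFne
    by_cases hone : F.length = 1
    · simp [hone]
    · have : F.length > 1 := by omega
      simp [this, hone]

-- ===== VERDICT (by name: the statement is the Claim_ definition above) =====
theorem solution_spec : Claim_equal_solution := by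
  intro array _ hpre
  unfold Spec_solution
  exact main_eq array hpre
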